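-- pv_equiv track=rewrite | github.com/deanalex-buno95/sp512023_cp3407_grp5_grablocator | app.py | get_nearest_station_code_from_postal_sector
-- ===== SOURCE A (Python) =====
-- def get_nearest_station_code_from_postal_sector(postal_sector):
--     """
--     Get the nearest station code from the postal sector.
--     :param postal_sector: str
--     :return: str
--     """
--     station_to_postal_sectors_dictionary = {"ST01": ("01", "02", "03", "04", "05", "06"),
--                                             "ST02": ("07", "08"),
--                                             "ST03": ("14", "15", "16"),
--                                             "ST04": ("09", "10"),
--                                             "ST05": ("11", "12", "13"),
--                                             "ST06": ("17",),
--                                             "ST07": ("18", "19"),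
--                                             "ST08": ("20", "21"),
--                                             "ST09": ("22", "23"),
--                                             "ST10": ("24", "25", "26", "27"),
--                                             "ST11": ("28", "29", "30"),
--                                             "ST12": ("31", "32", "33"),
--                                             "ST13": ("34", "35", "36", "37"),
--                                             "ST14": ("38", "39", "40", "41"),
--                                             "ST15": ("42", "43", "44", "45"),
--                                             "ST16": ("46", "47", "48"),
--                                             "ST17": ("49", "50", "81"),
--                                             "ST18": ("51", "52"),
--                                             "ST19": ("53", "54", "55", "82"),
--                                             "ST20": ("56", "57"),
--                                             "ST21": ("58", "59"),
--                                             "ST22": ("60", "61", "62", "63", "64"),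
--                                             "ST23": ("65", "66", "67", "68"),
--                                             "ST24": ("69", "70", "71", "72", "73"),
--                                             "ST25": ("77", "78"),
--                                             "ST26": ("75", "76"),
--                                             "ST27": ("79", "80")}
--     for station in station_to_postal_sectors_dictionary:
--         if postal_sector in station_to_postal_sectors_dictionary[station]:
--             return station
-- ===== SOURCE B (Python) =====
-- # Inverse index: sector -> station, built once as a literal; lookup is a single dict .get.
-- _SECTOR_TO_STATION = {
--     "01": "ST01",
--     "02": "ST01",
--     "03": "ST01",
--     "04": "ST01",
--     "05": "ST01",
--     "06": "ST01",
--     "07": "ST02",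
--     "08": "ST02",
--     "14": "ST03",
--     "15": "ST03",
--     "16": "ST03",
--     "09": "ST04",
--     "10": "ST04",
--     "11": "ST05",
--     "12": "ST05",
--     "13": "ST05",
--     "17": "ST06",
--     "18": "ST07",
--     "19": "ST07",
--     "20": "ST08",
--     "21": "ST08",
--     "22": "ST09",
--     "23": "ST09",
--     "24": "ST10",
--     "25": "ST10",
--     "26": "ST10",
--     "27": "ST10",
--     "28": "ST11",
--     "29": "ST11",
--     "30": "ST11",
--     "31": "ST12",
--     "32": "ST12",
--     "33": "ST12",
--     "34": "ST13",
--     "35": "ST13",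
--     "36": "ST13",
--     "37": "ST13",
--     "38": "ST14",
--     "39": "ST14",
--     "40": "ST14",
--     "41": "ST14",
--     "42": "ST15",
--     "43": "ST15",
--     "44": "ST15",
--     "45": "ST15",
--     "46": "ST16",
--     "47": "ST16",
--     "48": "ST16",
--     "49": "ST17",
--     "50": "ST17",
--     "81": "ST17",
--     "51": "ST18",
--     "52": "ST18",
--     "53": "ST19",
--     "54": "ST19",
--     "55": "ST19",
--     "82": "ST19",
--     "56": "ST20",
--     "57": "ST20",
--     "58": "ST21",
--     "59": "ST21",
--     "60": "ST22",
--     "61": "ST22",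
--     "62": "ST22",
--     "63": "ST22",
--     "64": "ST22",
--     "65": "ST23",
--     "66": "ST23",
--     "67": "ST23",
--     "68": "ST23",
--     "69": "ST24",
--     "70": "ST24",
--     "71": "ST24",
--     "72": "ST24",
--     "73": "ST24",
--     "77": "ST25",
--     "78": "ST25",
--     "75": "ST26",
--     "76": "ST26",
--     "79": "ST27",
--     "80": "ST27",
-- }
--
--
-- def get_nearest_station_code_from_postal_sector(postal_sector):
--     """
--     Get the nearest station code from the postal sector.
--     :param postal_sector: str
--     :return: str
--     """
--     return _SECTOR_TO_STATION.get(postal_sector)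
-- ===== Notes on version B (the rewrite author's own statement) =====
-- stated objective: idiomatic
-- what changed: Replaces A's per-call scan over the station->sectors table with a precomputed inverse sector->station dict literal and a single .get lookup, keeping None on a miss.
import Mathlib
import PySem

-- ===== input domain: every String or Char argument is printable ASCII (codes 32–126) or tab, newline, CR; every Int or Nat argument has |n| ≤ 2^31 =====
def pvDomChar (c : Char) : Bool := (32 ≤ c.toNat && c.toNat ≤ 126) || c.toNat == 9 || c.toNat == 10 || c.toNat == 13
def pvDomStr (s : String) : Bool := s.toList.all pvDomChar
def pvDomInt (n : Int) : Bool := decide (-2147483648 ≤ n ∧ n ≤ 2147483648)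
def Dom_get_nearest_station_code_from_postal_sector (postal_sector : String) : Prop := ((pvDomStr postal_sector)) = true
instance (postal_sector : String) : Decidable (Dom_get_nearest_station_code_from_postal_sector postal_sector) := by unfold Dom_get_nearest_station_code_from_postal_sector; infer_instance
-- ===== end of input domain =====

-- B replaces A's scan over the station→sectors table with a one-shot inverse sector→station
-- dict and a single lookup (objective: idiomatic; None on a miss is preserved).

-- ===== PORT A =====
-- A's dict literal, as an insertion-ordered association list of (station, sectors).
def pvStationTable : List (String × List String) := [
  ("ST01", ["01", "02", "03", "04", "05", "06"]),
  ("ST02", ["07", "08"]),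
  ("ST03", ["14", "15", "16"]),
  ("ST04", ["09", "10"]),
  ("ST05", ["11", "12", "13"]),
  ("ST06", ["17"]),
  ("ST07", ["18", "19"]),
  ("ST08", ["20", "21"]),
  ("ST09", ["22", "23"]),
  ("ST10", ["24", "25", "26", "27"]),
  ("ST11", ["28", "29", "30"]),
  ("ST12", ["31", "32", "33"]),
  ("ST13", ["34", "35", "36", "37"]),
  ("ST14", ["38", "39", "40", "41"]),
  ("ST15", ["42", "43", "44", "45"]),
  ("ST16", ["46", "47", "48"]),
  ("ST17", ["49", "50", "81"]),
  ("ST18", ["51", "52"]),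
  ("ST19", ["53", "54", "55", "82"]),
  ("ST20", ["56", "57"]),
  ("ST21", ["58", "59"]),
  ("ST22", ["60", "61", "62", "63", "64"]),
  ("ST23", ["65", "66", "67", "68"]),
  ("ST24", ["69", "70", "71", "72", "73"]),
  ("ST25", ["77", "78"]),
  ("ST26", ["75", "76"]),
  ("ST27", ["79", "80"])]

-- A's for-loop over the dict keys with the membership test and early return.
def pvScanStations : List (String × List String) → String → Option String
  | [], _ => none
  | (st, secs) :: rest, s => if secs.contains s then some st else pvScanStations rest s

def get_nearest_station_code_from_postal_sector (postal_sector : String) : Option String :=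
  pvScanStations pvStationTable postal_sector

-- ===== PORT B =====
-- Source B's module-level literal dict _SECTOR_TO_STATION.
def pvSectorToStation : PySem.Dict String String := PySem.Dict.ofList [
  ("01", "ST01"),
  ("02", "ST01"),
  ("03", "ST01"),
  ("04", "ST01"),
  ("05", "ST01"),
  ("06", "ST01"),
  ("07", "ST02"),
  ("08", "ST02"),
  ("14", "ST03"),
  ("15", "ST03"),
  ("16", "ST03"),
  ("09", "ST04"),
  ("10", "ST04"),
  ("11", "ST05"),
  ("12", "ST05"),
  ("13", "ST05"),
  ("17", "ST06"),
  ("18", "ST07"),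
  ("19", "ST07"),
  ("20", "ST08"),
  ("21", "ST08"),
  ("22", "ST09"),
  ("23", "ST09"),
  ("24", "ST10"),
  ("25", "ST10"),
  ("26", "ST10"),
  ("27", "ST10"),
  ("28", "ST11"),
  ("29", "ST11"),
  ("30", "ST11"),
  ("31", "ST12"),
  ("32", "ST12"),
  ("33", "ST12"),
  ("34", "ST13"),
  ("35", "ST13"),
  ("36", "ST13"),
  ("37", "ST13"),
  ("38", "ST14"),
  ("39", "ST14"),
  ("40", "ST14"),
  ("41", "ST14"),
  ("42", "ST15"),
  ("43", "ST15"),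
  ("44", "ST15"),
  ("45", "ST15"),
  ("46", "ST16"),
  ("47", "ST16"),
  ("48", "ST16"),
  ("49", "ST17"),
  ("50", "ST17"),
  ("81", "ST17"),
  ("51", "ST18"),
  ("52", "ST18"),
  ("53", "ST19"),
  ("54", "ST19"),
  ("55", "ST19"),
  ("82", "ST19"),
  ("56", "ST20"),
  ("57", "ST20"),
  ("58", "ST21"),
  ("59", "ST21"),
  ("60", "ST22"),
  ("61", "ST22"),
  ("62", "ST22"),
  ("63", "ST22"),
  ("64", "ST22"),
  ("65", "ST23"),
  ("66", "ST23"),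
  ("67", "ST23"),
  ("68", "ST23"),
  ("69", "ST24"),
  ("70", "ST24"),
  ("71", "ST24"),
  ("72", "ST24"),
  ("73", "ST24"),
  ("77", "ST25"),
  ("78", "ST25"),
  ("75", "ST26"),
  ("76", "ST26"),
  ("79", "ST27"),
  ("80", "ST27")]

def get_nearest_station_code_from_postal_sector_alt (postal_sector : String) : Option String :=
  pvSectorToStation.get? postal_sector

-- ===== PRECONDITION & SPEC =====
def Spec_get_nearest_station_code_from_postal_sector (postal_sector : String) (out : Option String) : Prop := out = get_nearest_station_code_from_postal_sector_alt postal_sector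
instance (postal_sector : String) (out : Option String) : Decidable (Spec_get_nearest_station_code_from_postal_sector postal_sector out) := by unfold Spec_get_nearest_station_code_from_postal_sector; infer_instance

-- ===== CLAIM (what is proved, stated in full; the proofs are below) =====
def Claim_equal_get_nearest_station_code_from_postal_sector : Prop := ∀ (postal_sector : String), Dom_get_nearest_station_code_from_postal_sector postal_sector → Spec_get_nearest_station_code_from_postal_sector postal_sector (get_nearest_station_code_from_postal_sector postal_sector)

-- ===== LEMMAS AND PROOFS =====

-- First-match lookup in one station's block of the flattened list.
theorem pv_get?_block (st : String) (secs : List String) (s : String) :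
    (PySem.Dict.mk (secs.map fun sec => (sec, st))).get? s
      = if s ∈ secs then some st else none := by
  induction secs with
  | nil => simp [PySem.Dict.get?]
  | cons a rest ih =>
    simp only [List.map_cons, PySem.Dict.get?_mk_cons, ih, List.mem_cons]
    by_cases h : s = a
    · simp [h]
    · have hb : (a == s) = false := by simp [Ne.symm h]
      simp [h, hb]

-- First-match lookup distributes over append.
theorem pv_get?_append (xs ys : List (String × String)) (s : String) :
    (PySem.Dict.mk (xs ++ ys)).get? s
      = ((PySem.Dict.mk xs).get? s).or ((PySem.Dict.mk ys).get? s) := by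
  induction xs with
  | nil => simp [PySem.Dict.get?]
  | cons p rest ih =>
    obtain ⟨k, v⟩ := p
    simp only [List.cons_append, PySem.Dict.get?_mk_cons, ih]
    by_cases h : k == s <;> simp [h]

-- A's scan over a table equals first-match lookup in its flattening.
theorem pv_scan_eq_lookup (t : List (String × List String)) (s : String) :
    pvScanStations t s
      = (PySem.Dict.mk (t.flatMap fun p => p.2.map fun sec => (sec, p.1))).get? s := by
  induction t with
  | nil => simp [pvScanStations, PySem.Dict.get?]
  | cons p rest ih =>
    obtain ⟨st, secs⟩ := p
    simp only [pvScanStations, List.flatMap_cons, pv_get?_append, pv_get?_block, ih,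
      List.contains_eq_mem, decide_eq_true_eq]
    by_cases h : s ∈ secs <;> simp [h]

-- ===== VERDICT (by name: the statement is the Claim_ definition above) =====
set_option maxRecDepth 20000 in
theorem get_nearest_station_code_from_postal_sector_spec : Claim_equal_get_nearest_station_code_from_postal_sector := by
  intro s _
  unfold Spec_get_nearest_station_code_from_postal_sector
  unfold get_nearest_station_code_from_postal_sector get_nearest_station_code_from_postal_sector_alt
  rw [pv_scan_eq_lookup]
  have h1 : pvSectorToStation
      = PySem.Dict.mk (pvStationTable.flatMap fun p => p.2.map fun sec => (sec, p.1)) := by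
    decide
  rw [h1]
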